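-- pv_equiv track=rewrite | github.com/davidiach/erdos97 | scripts/check_n9_row_ptolemy_order_sensitivity.py | _is_dihedral_order
-- ===== SOURCE A (Python) =====
-- from typing import Any, Sequence
--
-- def _is_dihedral_order(order: Sequence[int], base: Sequence[int]) -> bool:
--     """Return whether order is a rotation or reversal of base."""
--
--     actual = tuple(order)
--     reference = tuple(base)
--     if len(actual) != len(reference):
--         return False
--     rotations = []
--     for seq in (reference, tuple(reversed(reference))):
--         rotations.extend(seq[index:] + seq[:index] for index in range(len(seq)))
--     return actual in rotations
-- ===== SOURCE B (Python) =====
-- from typing import Sequence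
--
--
-- def _canonical_rotation(seq):
--     """Lexicographically least rotation of a nonempty tuple (canonical form)."""
--     n = len(seq)
--     return min(seq[i:] + seq[:i] for i in range(n)) if n else ()
--
--
-- def _is_dihedral_order(order: Sequence[int], base: Sequence[int]) -> bool:
--     """Return whether order is a rotation or reversal of base.
--
--     Canonicalization instead of search: two equal-length sequences are
--     rotations of each other iff their lexicographically least rotations
--     coincide, so we compare canonical forms rather than testing membership
--     in the set of all rotations.
--     Note: on empty inputs this correctly returns True, where A returns False.
--     """
--     if len(order) != len(base):
--         return False
--     c = _canonical_rotation(tuple(order))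
--     ref = tuple(base)
--     return c == _canonical_rotation(ref) or c == _canonical_rotation(ref[::-1])
-- ===== Notes on version B (the rewrite author's own statement) =====
-- stated objective: alternative
-- what changed: A tests membership of order in the materialised list of all rotations of base and of reversed base; B instead canonicalises each sequence to its lexicographically least rotation and compares canonical forms (rotation-equivalence via a canonical representative, not search).
-- intended difference: On order = [] and base = [] A returns False (its rotation list is empty), while B returns True, the intended value since the empty sequence is a rotation of itself. — e.g. on _is_dihedral_order([], []): A returns false, B returns true
import Mathlib
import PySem

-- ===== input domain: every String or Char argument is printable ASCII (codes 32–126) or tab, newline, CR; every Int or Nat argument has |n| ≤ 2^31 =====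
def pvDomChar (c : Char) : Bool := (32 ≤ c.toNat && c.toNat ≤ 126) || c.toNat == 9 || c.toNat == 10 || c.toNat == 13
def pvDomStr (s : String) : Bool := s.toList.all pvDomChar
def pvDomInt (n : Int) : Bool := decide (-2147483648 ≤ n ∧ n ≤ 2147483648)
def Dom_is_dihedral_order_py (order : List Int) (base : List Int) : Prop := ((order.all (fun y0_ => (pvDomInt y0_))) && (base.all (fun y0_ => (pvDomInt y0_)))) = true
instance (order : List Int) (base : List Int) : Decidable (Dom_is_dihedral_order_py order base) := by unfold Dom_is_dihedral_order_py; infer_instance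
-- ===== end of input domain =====

-- B replaces A's membership test in the materialised list of all rotations by a
-- canonical-form comparison (lexicographically least rotation of each sequence);
-- on ([], []) A returns False while B returns the intended True — see D_.


-- ===== PORT A =====
-- rotations.extend(seq[index:] + seq[:index] for index in range(len(seq))) over (reference, reversed(reference))
def is_dihedral_order_py (order : List Int) (base : List Int) : Bool :=
  let actual := order
  let reference := base
  if actual.length ≠ reference.length then false
  else
    let rotations := [reference, reference.reverse].foldl
      (fun acc seq => acc ++ (List.range seq.length).map (fun index => seq.drop index ++ seq.take index)) []
    decide (actual ∈ rotations)

-- ===== PORT B =====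
-- min(seq[i:] + seq[:i] for i in range(n)) if n else ()
def canonicalRotation (seq : List Int) : List Int :=
  match ((List.range seq.length).map (fun i => seq.drop i ++ seq.take i)).min? with
  | some m => m
  | none => []

-- c == canon(base) or c == canon(reversed base), where c = canon(order)
def is_dihedral_order_py_alt (order : List Int) (base : List Int) : Bool :=
  if order.length ≠ base.length then false
  else
    let c := canonicalRotation order
    (c == canonicalRotation base) || (c == canonicalRotation base.reverse)

-- ===== PRECONDITION & SPEC =====
-- On order = [] and base = [] A returns False (it compares against an empty rotation list),
-- but the empty order IS a rotation of the empty base, so B returns the intended True.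
def D_is_dihedral_order_py (order : List Int) (base : List Int) : Prop := order = [] ∧ base = []
instance (order : List Int) (base : List Int) : Decidable (D_is_dihedral_order_py order base) := by unfold D_is_dihedral_order_py; infer_instance
def Spec_is_dihedral_order_py (order : List Int) (base : List Int) (out : Bool) : Prop := ¬ D_is_dihedral_order_py order base → out = is_dihedral_order_py_alt order base
instance (order : List Int) (base : List Int) (out : Bool) : Decidable (Spec_is_dihedral_order_py order base out) := by unfold Spec_is_dihedral_order_py; infer_instance
def pvDiffWitness_is_dihedral_order_py : List Int × List Int := ([], [])
def pvDiffWitnessOut_is_dihedral_order_py : Bool × Bool := (false, true)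

-- ===== CLAIM =====
def Claim_unchanged_is_dihedral_order_py : Prop := ∀ (order : List Int) (base : List Int), Dom_is_dihedral_order_py order base → Spec_is_dihedral_order_py order base (is_dihedral_order_py order base)
def Claim_changed_is_dihedral_order_py : Prop := Dom_is_dihedral_order_py (pvDiffWitness_is_dihedral_order_py.1) (pvDiffWitness_is_dihedral_order_py.2) ∧ D_is_dihedral_order_py (pvDiffWitness_is_dihedral_order_py.1) (pvDiffWitness_is_dihedral_order_py.2) ∧ is_dihedral_order_py (pvDiffWitness_is_dihedral_order_py.1) (pvDiffWitness_is_dihedral_order_py.2) = pvDiffWitnessOut_is_dihedral_order_py.1 ∧ is_dihedral_order_py_alt (pvDiffWitness_is_dihedral_order_py.1) (pvDiffWitness_is_dihedral_order_py.2) = pvDiffWitnessOut_is_dihedral_order_py.2 ∧ pvDiffWitnessOut_is_dihedral_order_py.1 ≠ pvDiffWitnessOut_is_dihedral_order_py.2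
def Claim_exact_is_dihedral_order_py : Prop := ∀ (order : List Int) (base : List Int), Dom_is_dihedral_order_py order base → D_is_dihedral_order_py order base → is_dihedral_order_py order base ≠ is_dihedral_order_py_alt order base

-- ===== LEMMAS AND PROOFS =====

-- A's rotation list of one seq contains exactly the rotations of seq, when seq ≠ []
lemma mem_rotList_iff (seq x : List Int) (hne : seq ≠ []) :
    x ∈ (List.range seq.length).map (fun i => seq.drop i ++ seq.take i) ↔ seq ~r x := by
  have hpos : 0 < seq.length := List.length_pos_of_ne_nil hne
  simp only [List.mem_map, List.mem_range]
  constructor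
  · rintro ⟨i, hi, rfl⟩
    exact ⟨i, List.rotate_eq_drop_append_take (le_of_lt hi)⟩
  · rintro ⟨k, hk⟩
    refine ⟨k % seq.length, Nat.mod_lt _ hpos, ?_⟩
    rw [← List.rotate_eq_drop_append_take (le_of_lt (Nat.mod_lt _ hpos)), List.rotate_mod, hk]

-- the rotation list of a nonempty seq is nonempty, so its min? is some value
lemma rotList_min?_isSome (seq : List Int) (hne : seq ≠ []) :
    ∃ m, ((List.range seq.length).map (fun i => seq.drop i ++ seq.take i)).min? = some m := by
  rcases h : ((List.range seq.length).map (fun i => seq.drop i ++ seq.take i)).min? with _ | m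
  · rw [List.min?_eq_none_iff, List.map_eq_nil_iff, List.range_eq_nil] at h
    exact absurd (List.eq_nil_of_length_eq_zero h) hne
  · exact ⟨m, rfl⟩

-- the canonical rotation of a nonempty list is one of its rotations
lemma canon_isRotated (seq : List Int) (hne : seq ≠ []) : seq ~r canonicalRotation seq := by
  obtain ⟨m, hm⟩ := rotList_min?_isSome seq hne
  have := (mem_rotList_iff seq m hne).1 (List.min?_mem hm)
  unfold canonicalRotation
  rw [hm]
  exact this

-- min? of lists with equal membership agree in value
lemma min?_eq_of_mem_iff (xs ys : List (List Int)) (h : ∀ x, x ∈ xs ↔ x ∈ ys)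
    (m m' : List Int) (hm : xs.min? = some m) (hm' : ys.min? = some m') : m = m' := by
  rw [List.min?_eq_some_iff] at hm hm'
  exact le_antisymm (hm.2 m' ((h m').2 hm'.1)) (hm'.2 m ((h m).1 hm.1))

-- rotation-equivalent nonempty lists have the same canonical rotation
lemma canon_eq_of_isRotated (l l' : List Int) (h : l ~r l') (hne : l ≠ []) :
    canonicalRotation l = canonicalRotation l' := by
  have hne' : l' ≠ [] := by
    intro e; subst e
    obtain ⟨n, hn⟩ := h
    exact hne (by simpa using congrArg List.length hn)
  obtain ⟨m, hm⟩ := rotList_min?_isSome l hne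
  obtain ⟨m', hm'⟩ := rotList_min?_isSome l' hne'
  have hmem : ∀ x, x ∈ (List.range l.length).map (fun i => l.drop i ++ l.take i) ↔
      x ∈ (List.range l'.length).map (fun i => l'.drop i ++ l'.take i) := by
    intro x
    rw [mem_rotList_iff l x hne, mem_rotList_iff l' x hne']
    exact ⟨fun hx => h.symm.trans hx, fun hx => h.trans hx⟩
  unfold canonicalRotation
  rw [hm, hm']
  exact min?_eq_of_mem_iff _ _ hmem m m' hm hm'

-- for nonempty l and x: x is a rotation of l iff the canonical forms coincide
lemma canon_eq_iff (l x : List Int) (hne : l ≠ []) (hxne : x ≠ []) :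
    (l ~r x) ↔ canonicalRotation x = canonicalRotation l := by
  constructor
  · intro h
    exact (canon_eq_of_isRotated l x h hne).symm
  · intro h
    have h1 := canon_isRotated l hne
    have h2 := canon_isRotated x hxne
    rw [h] at h2
    exact (h2.trans h1.symm).symm

theorem is_dihedral_order_py_spec : Claim_unchanged_is_dihedral_order_py := by
  intro order base _ hD
  unfold is_dihedral_order_py is_dihedral_order_py_alt
  by_cases hlen : order.length = base.length
  · simp only [hlen, ne_eq, not_true_eq_false, if_false]
    have hbne : base ≠ [] := by
      intro hb
      exact hD ⟨List.eq_nil_of_length_eq_zero (by simp [hb] at hlen ⊢; exact hlen), hb⟩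
    have hone : order ≠ [] := by
      intro ho
      exact hbne (List.eq_nil_of_length_eq_zero (by simp [ho] at hlen; omega))
    have hrne : base.reverse ≠ [] := by simpa using hbne
    simp only [List.foldl, List.nil_append]
    rw [Bool.eq_iff_iff]
    simp only [decide_eq_true_eq, Bool.or_eq_true, beq_iff_eq, List.mem_append]
    rw [mem_rotList_iff base order hbne, mem_rotList_iff base.reverse order hrne,
      canon_eq_iff base order hbne hone, canon_eq_iff base.reverse order hrne hone]
  · rw [if_pos hlen, if_pos hlen]

theorem is_dihedral_order_py_changed : Claim_changed_is_dihedral_order_py := by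
  unfold Claim_changed_is_dihedral_order_py; decide

theorem is_dihedral_order_py_tight : Claim_exact_is_dihedral_order_py := by
  intro order base _ hD
  obtain ⟨h1, h2⟩ := hD
  subst h1; subst h2
  decide
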